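-- pv_equiv track=rewrite | github.com/JavierLuna/advent-of-code-2020 | solutions/day8/solution.py | _generate_possible_suspects
-- ===== SOURCE A (Python) =====
-- from typing import Tuple, List, Dict
--
-- def _generate_possible_suspects(instructions: List[Tuple[str, int]]) -> List[int]:
--     possible_suspects: List[int] = []
--     for p_i, (op, arg) in enumerate(instructions):
--         if op == "nop":
--             if arg == 0:
--                 continue
--             possible_suspects.append(p_i)
--         if op == "jmp":
--             if arg == 0:
--                 possible_suspects = [p_i]
--                 break
--             possible_suspects.append(p_i)
--     return possible_suspects
-- ===== SOURCE B (Python) =====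
-- from typing import Tuple, List
--
-- def _generate_possible_suspects(instructions):
--     for j, (op, arg) in enumerate(instructions):
--         if op == "jmp" and arg == 0:
--             return [j]
--     return [i for i, (op, arg) in enumerate(instructions)
--             if op in ("nop", "jmp") and arg != 0]
-- ===== Notes on version B (the rewrite author's own statement) =====
-- stated objective: simpler
-- what changed: Replaced the single mutate-append-reset-break loop with a find-first search for the terminating jmp-0 instruction followed by a plain filtering comprehension for the general case.
import Mathlib
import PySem

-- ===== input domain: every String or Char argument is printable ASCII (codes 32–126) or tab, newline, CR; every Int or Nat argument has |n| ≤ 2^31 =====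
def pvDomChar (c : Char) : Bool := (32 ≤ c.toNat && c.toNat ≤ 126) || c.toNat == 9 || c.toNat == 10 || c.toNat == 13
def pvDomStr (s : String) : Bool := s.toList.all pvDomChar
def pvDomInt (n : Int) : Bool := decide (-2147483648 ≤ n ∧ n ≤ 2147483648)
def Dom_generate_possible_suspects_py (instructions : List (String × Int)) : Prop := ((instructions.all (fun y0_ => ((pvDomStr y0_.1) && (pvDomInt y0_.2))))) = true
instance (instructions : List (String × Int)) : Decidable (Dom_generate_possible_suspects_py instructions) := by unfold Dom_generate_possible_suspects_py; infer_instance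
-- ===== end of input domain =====

-- ===== PORT A =====
-- B is a simpler decomposition: find-first terminating jmp-0, else a filtering pass; return value only.
def goA : List (String × Int) → Int → List Int → List Int
  | [], _, acc => acc
  | (op, arg) :: rest, i, acc =>
    if op == "nop" then
      (if arg == 0 then goA rest (i + 1) acc            -- continue
       else goA rest (i + 1) (acc ++ [i]))              -- append; op ≠ "jmp", second if is false
    else if op == "jmp" then
      (if arg == 0 then [i]                             -- possible_suspects = [p_i]; break
       else goA rest (i + 1) (acc ++ [i]))
    else goA rest (i + 1) acc

def generate_possible_suspects_py (instructions : List (String × Int)) : List Int :=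
  goA instructions 0 []

-- ===== PORT B =====
def findJmp0 : List (String × Int) → Int → Option Int
  | [], _ => none
  | (op, arg) :: rest, i =>
    if op == "jmp" && arg == 0 then some i else findJmp0 rest (i + 1)

def collectB : List (String × Int) → Int → List Int
  | [], _ => []
  | (op, arg) :: rest, i =>
    if (op == "nop" || op == "jmp") && !(arg == 0) then i :: collectB rest (i + 1)
    else collectB rest (i + 1)

def generate_possible_suspects_py_alt (instructions : List (String × Int)) : List Int :=
  match findJmp0 instructions 0 with
  | some j => [j]
  | none => collectB instructions 0

-- ===== PRECONDITION & SPEC =====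
def Spec_generate_possible_suspects_py (instructions : List (String × Int)) (out : List Int) : Prop := out = generate_possible_suspects_py_alt instructions
instance (instructions : List (String × Int)) (out : List Int) : Decidable (Spec_generate_possible_suspects_py instructions out) := by unfold Spec_generate_possible_suspects_py; infer_instance

-- ===== CLAIM (what is proved, stated in full; the proofs are below) =====
def Claim_equal_generate_possible_suspects_py : Prop := ∀ (instructions : List (String × Int)), Dom_generate_possible_suspects_py instructions → Spec_generate_possible_suspects_py instructions (generate_possible_suspects_py instructions)

-- ===== LEMMAS AND PROOFS =====
theorem goA_eq (rest : List (String × Int)) : ∀ (i : Int) (acc : List Int),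
    goA rest i acc =
      match findJmp0 rest i with
      | some j => [j]
      | none => acc ++ collectB rest i := by
  induction rest with
  | nil => intro i acc; simp [goA, findJmp0, collectB]
  | cons hd tl ih =>
    intro i acc
    obtain ⟨op, arg⟩ := hd
    by_cases hn : op = "nop" <;> by_cases hj : op = "jmp" <;>
      by_cases hz : arg = 0 <;>
      simp [goA, findJmp0, collectB, hn, hj, hz, ih]

-- ===== VERDICT (by name: the statement is the Claim_ definition above) =====
theorem generate_possible_suspects_py_spec : Claim_equal_generate_possible_suspects_py := by
  intro instructions _
  unfold Spec_generate_possible_suspects_py generate_possible_suspects_py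
    generate_possible_suspects_py_alt
  rw [goA_eq]
  cases findJmp0 instructions 0 <;> simp
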